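-- pv_equiv track=rewrite | github.com/Danpun9/Baekjoon | Python/백준/Silver/6576. 쿼드 트리/쿼드 트리.py | grid_to_xbm
-- ===== SOURCE A (Python) =====
-- def grid_to_xbm(grid, n):
--     result = []
--     result.append(f"#define quadtree_width {n}")
--     result.append(f"#define quadtree_height {n}")
--     result.append("static char quadtree_bits[] = {")
--
--     for row in grid:
--         hex_values = []
--         for i in range(0, n, 8):
--             byte_val = 0
--             for j in range(8):
--                 if i + j < n and row[i + j] == 1:
--                     byte_val += 1 << j
--             hex_values.append(f"0x{byte_val:02x}")
--         result.append(",".join(hex_values) + ",")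
--
--     result.append("};")
--     return result
-- ===== SOURCE B (Python) =====
-- def grid_to_xbm(grid, n):
--     nbytes = (n + 7) // 8 if n > 0 else 0
--     lines = [f"#define quadtree_width {n}",
--              f"#define quadtree_height {n}",
--              "static char quadtree_bits[] = {"]
--     for row in grid:
--         val = 0
--         for k in range(n):
--             if row[k] == 1:
--                 val |= 1 << k
--         lines.append(",".join(f"0x{(val >> (8 * i)) & 0xff:02x}" for i in range(nbytes)) + ",")
--     lines.append("};")
--     return lines
-- ===== Notes on version B (the rewrite author's own statement) =====
-- stated objective: alternative
-- what changed: B packs each row into a single integer bitmask in one pass (val |= 1<<k) and then slices the output bytes out of that integer with shift-and-mask, instead of A's per-byte inner loop re-reading the row 8 cells at a time; header/footer, 0x%02x formatting and the trailing comma are identical.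
import Mathlib
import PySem

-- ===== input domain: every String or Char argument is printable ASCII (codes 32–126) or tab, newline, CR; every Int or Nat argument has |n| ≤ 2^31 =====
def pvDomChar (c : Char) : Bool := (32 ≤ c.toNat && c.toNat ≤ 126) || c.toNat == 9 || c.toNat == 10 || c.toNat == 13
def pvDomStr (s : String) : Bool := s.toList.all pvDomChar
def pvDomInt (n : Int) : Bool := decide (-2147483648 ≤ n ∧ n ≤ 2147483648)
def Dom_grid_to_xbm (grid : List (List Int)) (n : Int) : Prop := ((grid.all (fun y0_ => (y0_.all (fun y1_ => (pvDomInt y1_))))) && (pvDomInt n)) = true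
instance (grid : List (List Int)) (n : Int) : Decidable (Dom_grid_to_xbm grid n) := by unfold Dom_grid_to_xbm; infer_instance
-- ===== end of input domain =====

-- B replaces A's per-byte inner loop by packing each row into one integer bitmask and slicing
-- bytes out of it (objective: alternative decomposition, same asymptotic cost).

-- f"0x{v:02x}" for a value 0 ≤ v < 256 (the only values either program formats): "0x" + two lowercase hex digits
def pvHexDigit (k : Nat) : Char := if k < 10 then Char.ofNat (48 + k) else Char.ofNat (87 + k)
def pvHexByte (v : Int) : String := "0x" ++ String.ofList [pvHexDigit (v.toNat / 16), pvHexDigit (v.toNat % 16)]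

-- ===== PORT A =====
-- literal transliteration of A: per row, for i in range(0,n,8) an inner loop over j in range(8)
-- accumulating byte_val += 1 << j when i+j < n and row[i+j] == 1  (1 <<< j.toNat is exact: j ≥ 0 here)
def grid_to_xbm (grid : List (List Int)) (n : Int) : List String :=
  let header : List String :=
    ["#define quadtree_width " ++ PySem.Int.toStr n,
     "#define quadtree_height " ++ PySem.Int.toStr n,
     "static char quadtree_bits[] = {"]
  let body : List String := grid.map (fun (row : List Int) =>
    let hexValues : List String :=
      (PySem.List.pyRange 0 n 8).map (fun i =>
        let byteVal : Int :=
          (PySem.List.pyRange 0 8 1).foldl (fun acc j =>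
            if i + j < n ∧ PySem.List.pyGetD row (i + j) 0 = 1 then acc + ((1 : Int) <<< j.toNat) else acc) 0
        pvHexByte byteVal)
    PySem.Str.join "," hexValues ++ ",")
  header ++ body ++ ["};"]

-- ===== PORT B =====
-- literal transliteration of Source B: one bitmask per row (val |= 1 << k), then nbytes = (n+7)//8
-- bytes extracted by (val >> 8*i) & 0xff  (shift amounts are ≥ 0 here, so .toNat is exact)
def grid_to_xbm_alt (grid : List (List Int)) (n : Int) : List String :=
  let nbytes : Int := if 0 < n then PySem.Int.floordiv (n + 7) 8 else 0
  let lines : List String :=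
    ["#define quadtree_width " ++ PySem.Int.toStr n,
     "#define quadtree_height " ++ PySem.Int.toStr n,
     "static char quadtree_bits[] = {"]
  let body : List String := grid.map (fun (row : List Int) =>
    let val : Int :=
      (PySem.List.pyRange 0 n 1).foldl (fun v k =>
        if PySem.List.pyGetD row k 0 = 1 then Int.lor v ((1 : Int) <<< k.toNat) else v) 0
    PySem.Str.join ","
      ((PySem.List.pyRange 0 nbytes 1).map (fun i =>
        pvHexByte (Int.land (val >>> (8 * i).toNat) 255))) ++ ",")
  lines ++ body ++ ["};"]

-- ===== PRECONDITION & SPEC =====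
-- A (and B) index row[k] for every k < n, so each row must have length ≥ n (no constraint if n ≤ 0);
-- Pre_ excludes exactly the inputs where Python raises IndexError.
def Pre_grid_to_xbm (grid : List (List Int)) (n : Int) : Prop :=
  n ≤ 0 ∨ ∀ row ∈ grid, n ≤ (row.length : Int)
instance (grid : List (List Int)) (n : Int) : Decidable (Pre_grid_to_xbm grid n) := by
  unfold Pre_grid_to_xbm; infer_instance

def pvWitness_grid_to_xbm : List (List Int) × Int := ([[1, 0, 1], [0, 1, 0]], 3)

def Spec_grid_to_xbm (grid : List (List Int)) (n : Int) (out : List String) : Prop := out = grid_to_xbm_alt grid n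
instance (grid : List (List Int)) (n : Int) (out : List String) : Decidable (Spec_grid_to_xbm grid n out) := by unfold Spec_grid_to_xbm; infer_instance

-- ===== CLAIM (what is proved, stated in full; the proofs are below) =====
def Claim_equal_grid_to_xbm : Prop := ∀ (grid : List (List Int)) (n : Int), Dom_grid_to_xbm grid n → Pre_grid_to_xbm grid n → Spec_grid_to_xbm grid n (grid_to_xbm grid n)

-- ===== LEMMAS AND PROOFS =====

-- Nat models of the two inner computations
def pvByteN (P : Nat → Bool) (c : Nat) : Nat :=
  (List.range c).foldl (fun a j => if P j then a + 2 ^ j else a) 0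
def pvMaskN (Q : Nat → Bool) (c : Nat) : Nat :=
  (List.range c).foldl (fun a k => if Q k then a ||| 2 ^ k else a) 0

lemma pvByteN_lt_testBit (P : Nat → Bool) (c : Nat) :
    pvByteN P c < 2 ^ c ∧ ∀ t, (pvByteN P c).testBit t = (decide (t < c) && P t) := by
  induction c with
  | zero => simp [pvByteN]
  | succ c ih =>
    obtain ⟨hlt, htb⟩ := ih
    have hstep : pvByteN P (c + 1) = if P c then pvByteN P c + 2 ^ c else pvByteN P c := by
      simp [pvByteN, List.range_succ]
    constructor
    · rw [hstep]; split_ifs with hp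
      · have : (2:Nat) ^ (c+1) = 2^c + 2^c := by ring
        omega
      · calc pvByteN P c < 2^c := hlt
          _ ≤ 2^(c+1) := Nat.pow_le_pow_right (by norm_num) (by omega)
    · intro t
      rw [hstep]; split_ifs with hp
      · have : pvByteN P c + 2^c = 2^c * 1 + pvByteN P c := by ring
        rw [this, Nat.testBit_two_pow_mul_add 1 hlt t]
        by_cases ht : t < c
        · simp [ht, htb t, Nat.lt_succ_of_lt ht]
        · have h1 : Nat.testBit 1 (t - c) = decide (t - c = 0) := by
            have : (1:Nat) = 2^0 := by norm_num
            rw [this, Nat.testBit_two_pow]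
            simp [eq_comm]
          simp only [if_neg ht, h1]
          by_cases htc : t = c
          · subst htc; simp [hp]
          · have : ¬ t - c = 0 := by omega
            have : ¬ t < c + 1 := by omega
            simp [*]
      · rw [htb t]
        by_cases htc : t = c
        · subst htc; simp [hp]
        · by_cases ht : t < c
          · simp [ht, Nat.lt_succ_of_lt ht]
          · have h1 : ¬ t < c := ht
            have h2 : ¬ t < c + 1 := by omega
            simp [h1, h2]

lemma pvMaskN_testBit (Q : Nat → Bool) (c : Nat) (t : Nat) :
    (pvMaskN Q c).testBit t = (decide (t < c) && Q t) := by
  induction c with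
  | zero => simp [pvMaskN]
  | succ c ih =>
    have hstep : pvMaskN Q (c + 1) = if Q c then pvMaskN Q c ||| 2 ^ c else pvMaskN Q c := by
      simp [pvMaskN, List.range_succ]
    rw [hstep]; split_ifs with hq
    · rw [Nat.testBit_or, ih, Nat.testBit_two_pow]
      by_cases htc : t = c
      · subst htc; simp [hq]
      · by_cases ht : t < c
        · simp [ht, Nat.lt_succ_of_lt ht, Ne.symm htc]
        · have h2 : ¬ t < c + 1 := by omega
          simp [ht, h2, Ne.symm htc]
    · rw [ih]
      by_cases htc : t = c
      · subst htc; simp [hq]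
      · by_cases ht : t < c
        · simp [ht, Nat.lt_succ_of_lt ht]
        · have h2 : ¬ t < c + 1 := by omega
          simp [ht, h2]

-- the central fact: A's byte (i = 8*b) is byte b of B's mask
lemma pvByte_eq_mask (Q : Nat → Bool) (m b : Nat) :
    pvByteN (fun j => decide (8 * b + j < m) && Q (8 * b + j)) 8
      = (pvMaskN Q m >>> (8 * b)) &&& 255 := by
  apply Nat.eq_of_testBit_eq
  intro t
  rw [(pvByteN_lt_testBit _ 8).2 t, Nat.testBit_and, Nat.testBit_shiftRight, pvMaskN_testBit]
  have h255 : (255 : Nat) = 2 ^ 8 - 1 := by norm_num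
  rw [h255, Nat.testBit_two_pow_sub_one]
  by_cases ht : t < 8 <;> by_cases hm : 8 * b + t < m <;> simp [ht, hm]

-- bridge: A's Int inner fold equals the Nat byte model (indices and shifts are nonnegative)
lemma pvA_byte (row : List Int) (m b : Nat) (c : Nat) :
    (List.range c).foldl
      (fun (acc : Int) (j : Nat) =>
        if (((8 * b : Nat) : Int) + j < (m : Int) ∧ PySem.List.pyGetD row (((8 * b : Nat) : Int) + j) 0 = 1)
        then acc + ((1 : Int) <<< j) else acc) 0
    = ((pvByteN (fun j => decide (8 * b + j < m) && (row.getD (8 * b + j) 0 == 1)) c : Nat) : Int) := by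
  induction c with
  | zero => simp [pvByteN]
  | succ c ih =>
    have hstep : pvByteN (fun j => decide (8 * b + j < m) && (row.getD (8 * b + j) 0 == 1)) (c + 1)
        = if (decide (8 * b + c < m) && (row.getD (8 * b + c) 0 == 1)) = true
          then pvByteN (fun j => decide (8 * b + j < m) && (row.getD (8 * b + j) 0 == 1)) c + 2 ^ c
          else pvByteN (fun j => decide (8 * b + j < m) && (row.getD (8 * b + j) 0 == 1)) c := by
      simp [pvByteN, List.range_succ]
    rw [List.range_succ, List.foldl_append, ih, hstep]
    simp only [List.foldl_cons, List.foldl_nil]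
    have hidx : (((8 * b : Nat) : Int) + (c : Int)) = ((8 * b + c : Nat) : Int) := by push_cast; ring
    have hcond : (((8 * b : Nat) : Int) + c < (m : Int) ∧ PySem.List.pyGetD row (((8 * b : Nat) : Int) + c) 0 = 1)
        ↔ (decide (8 * b + c < m) && (row.getD (8 * b + c) 0 == 1)) = true := by
      rw [hidx, PySem.List.pyGetD_natCast, Bool.and_eq_true, decide_eq_true_iff, beq_iff_eq]
      constructor
      · rintro ⟨h1, h2⟩; exact ⟨by omega, h2⟩
      · rintro ⟨h1, h2⟩; exact ⟨by omega, h2⟩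
    by_cases h : (((8 * b : Nat) : Int) + c < (m : Int) ∧ PySem.List.pyGetD row (((8 * b : Nat) : Int) + c) 0 = 1)
    · rw [if_pos h, if_pos (hcond.mp h)]
      have h1 : ((1 : Int) <<< c) = ((2 ^ c : Nat) : Int) := by
        rw [show ((2 ^ c : Nat) : Int) = (((1 <<< c : Nat) : Nat) : Int) by rw [Nat.one_shiftLeft]]
        rfl
      rw [h1]; push_cast; ring
    · rw [if_neg h, if_neg (by simp only [← hcond]; exact h)]

-- bridge: B's Int mask fold equals the Nat mask model
lemma pvB_mask (row : List Int) (c : Nat) :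
    (List.range c).foldl
      (fun (v : Int) (k : Nat) =>
        if PySem.List.pyGetD row (k : Int) 0 = 1 then Int.lor v ((1 : Int) <<< k) else v) 0
    = ((pvMaskN (fun k => row.getD k 0 == 1) c : Nat) : Int) := by
  induction c with
  | zero => simp [pvMaskN]
  | succ c ih =>
    have hstep : pvMaskN (fun k => row.getD k 0 == 1) (c + 1)
        = if (row.getD c 0 == 1) = true
          then pvMaskN (fun k => row.getD k 0 == 1) c ||| 2 ^ c
          else pvMaskN (fun k => row.getD k 0 == 1) c := by
      simp [pvMaskN, List.range_succ]
    rw [List.range_succ, List.foldl_append, ih, hstep]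
    simp only [List.foldl_cons, List.foldl_nil]
    rw [PySem.List.pyGetD_natCast]
    by_cases h : row.getD c 0 = 1
    · rw [if_pos h, if_pos (beq_iff_eq.mpr h)]
      have h1 : ((1 : Int) <<< c) = ((2 ^ c : Nat) : Int) := by
        rw [show ((2 ^ c : Nat) : Int) = (((1 <<< c : Nat) : Nat) : Int) by rw [Nat.one_shiftLeft]]
        rfl
      rw [h1]
      exact Int.mem_toNat?.mp rfl
    · rw [if_neg h, if_neg (fun hc => h (beq_iff_eq.mp hc))]

-- the per-row equality, under the row-length precondition
lemma pvRow_eq (row : List Int) (n : Int) (h : n ≤ 0 ∨ n ≤ (row.length : Int)) :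
    PySem.Str.join ","
        ((PySem.List.pyRange 0 n 8).map (fun i =>
          pvHexByte ((PySem.List.pyRange 0 8 1).foldl (fun acc j =>
            if i + j < n ∧ PySem.List.pyGetD row (i + j) 0 = 1 then acc + ((1 : Int) <<< j.toNat) else acc) 0))) ++ ","
    = PySem.Str.join ","
        ((PySem.List.pyRange 0 (if 0 < n then PySem.Int.floordiv (n + 7) 8 else 0) 1).map (fun i =>
          pvHexByte (Int.land
            (((PySem.List.pyRange 0 n 1).foldl (fun v k =>
              if PySem.List.pyGetD row k 0 = 1 then Int.lor v ((1 : Int) <<< k.toNat) else v) 0) >>> (8 * i).toNat) 255))) ++ "," := by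
  by_cases hn : 0 < n
  · -- n > 0; write n = ↑m and work over List.range ((m+7)/8)
    obtain ⟨m, rfl⟩ : ∃ m : Nat, n = (m : Int) := ⟨n.toNat, by omega⟩
    have hm : 0 < m := by exact_mod_cast hn
    have hdiv : ((m + 7 : Nat) : Int) / 8 = (((m + 7) / 8 : Nat) : Int) :=
      Eq.symm (Nat.ToInt.div_congr rfl rfl)
    have hA : PySem.List.pyRange 0 (m : Int) 8 =
        (List.range ((m + 7) / 8)).map (fun b => ((8 * b : Nat) : Int)) := by
      rw [PySem.List.pyRange_of_pos 0 (m : Int) (by norm_num)]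
      rw [if_pos (by exact_mod_cast hm)]
      have h1 : (((m : Int) - 0 + 8 - 1) / 8).toNat = (m + 7) / 8 := by
        have h2 : ((m : Int) - 0 + 8 - 1) = ((m + 7 : Nat) : Int) := by push_cast; ring
        rw [h2, hdiv, Int.toNat_natCast]
      rw [h1]
      apply List.map_congr_left
      intro b _
      push_cast; ring
    have hB : (if 0 < (m : Int) then PySem.Int.floordiv ((m : Int) + 7) 8 else 0)
        = (((m + 7) / 8 : Nat) : Int) := by
      rw [if_pos (by exact_mod_cast hm), PySem.Int.floordiv_eq_ediv_of_pos (by norm_num)]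
      rw [show ((m : Int) + 7) = ((m + 7 : Nat) : Int) by push_cast; ring, hdiv]
    have hOuter : PySem.List.pyRange 0 (((m + 7) / 8 : Nat) : Int) 1
        = (List.range ((m + 7) / 8)).map (fun k => ((k : Nat) : Int)) := by
      rw [PySem.List.pyRange_one]
      rw [show ((((m + 7) / 8 : Nat) : Int) - 0) = (((m + 7) / 8 : Nat) : Int) by ring, Int.toNat_natCast]
      simp
    rw [hA, hB, hOuter]
    simp only [List.map_map]
    congr 2
    apply List.map_congr_left
    intro b _
    simp only [Function.comp_apply]
    conv_lhs => rw [PySem.List.pyRange_one]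
    conv_rhs => rw [PySem.List.pyRange_one]
    simp only [Int.sub_zero, Int.toNat_natCast, List.foldl_map, zero_add,
      show ((8 : Int)).toNat = 8 from rfl]
    rw [pvB_mask row m, pvA_byte row m b 8, pvByte_eq_mask (fun k => row.getD k 0 == 1) m b]
    congr 1
    rw [show (8 * ((b : Nat) : Int)).toNat = 8 * b by
      rw [show (8 * ((b : Nat) : Int)) = ((8 * b : Nat) : Int) by push_cast; ring, Int.toNat_natCast]]
    rw [show ((pvMaskN (fun k => row.getD k 0 == 1) m : Nat) : Int) >>> ((8 * b : Nat) : Int)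
        = (((pvMaskN (fun k => row.getD k 0 == 1) m >>> (8 * b) : Nat)) : Int) from
      Int.shiftRight_natCast _ _]
    exact Int.mem_toNat?.mp rfl
  · -- n ≤ 0: both byte ranges are empty
    have hA : PySem.List.pyRange 0 n 8 = [] := by
      rw [PySem.List.pyRange_of_pos 0 n (by norm_num)]
      rw [if_neg (by omega)]
      simp
    rw [hA, if_neg hn]
    have hB : PySem.List.pyRange 0 (0 : Int) 1 = [] := by
      rw [PySem.List.pyRange_one]; simp
    rw [hB]
    simp

-- ===== VERDICT (by name: the statement is the Claim_ definition above) =====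
theorem grid_to_xbm_spec : Claim_equal_grid_to_xbm := by
  intro grid n _ hpre
  unfold Spec_grid_to_xbm grid_to_xbm grid_to_xbm_alt
  simp only []
  rw [show List.map _ grid = List.map _ grid from
    List.map_congr_left (fun row hrow => pvRow_eq row n (by
      rcases hpre with h | h
      · exact Or.inl h
      · exact Or.inr (h row hrow)))]
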